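-- pv_equiv track=rewrite | github.com/aadiTechnology/prodRepo | apps/fastapi/app/services/story_quality_service.py | _deduplicate_canonicals
-- ===== SOURCE A (Python) =====
-- def _scenario_stem(canonical_id: str) -> str:
--     """Stem for grouping similar scenarios (e.g. user_logout, user_logs_out -> same group)."""
--     if not canonical_id:
--         return ""
--     parts = canonical_id.split("_")
--     if len(parts) <= 2:
--         return canonical_id
--     # Prefer last part (action) + first part (actor) for grouping
--     return "_".join([parts[0], parts[-1]]) if parts else ""
--
-- def _deduplicate_canonicals(
--     ac_ids: list[str], tc_ids: list[str]
-- ) -> tuple[list[str], list[str], set[str]]: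
--     """
--     Merge duplicate scenarios into one canonical per group.
--     Returns (normalized_scenarios, missing_test_case_scenarios, tc_canonical_set).
--     - normalized_scenarios: sorted unique canonical ids (one per logical scenario).
--     - missing_test_case_scenarios: canonical ids that come from AC but have no TC coverage.
--     - tc_canonical_set: set of canonical ids that are covered by test cases.
--     """
--     # Group by stem: stem -> list of (canonical_id, source: 'ac'|'tc')
--     groups: dict[str, list[tuple[str, str]]] = {}
--     for cid in ac_ids:
--         if not cid:
--             continue
--         stem = _scenario_stem(cid)
--         if stem not in groups:
--             groups[stem] = []
--         groups[stem].append((cid, "ac"))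
--     for cid in tc_ids:
--         if not cid:
--             continue
--         stem = _scenario_stem(cid)
--         if stem not in groups:
--             groups[stem] = []
--         groups[stem].append((cid, "tc"))
--
--     normalized: list[str] = []
--     missing: list[str] = []
--     tc_covered_stems: set[str] = set()
--
--     for stem, pairs in groups.items():
--         # Pick one canonical id for this group (shortest action-based)
--         canonical_ids = list({p[0] for p in pairs})
--         chosen = min(canonical_ids, key=lambda x: (len(x), x))
--         normalized.append(chosen)
--
--         has_ac = any(s == "ac" for _, s in pairs)
--         has_tc = any(s == "tc" for _, s in pairs)
--         if has_tc:
--             tc_covered_stems.add(stem)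
--         if has_ac and not has_tc:
--             missing.append(chosen)
--
--     return sorted(set(normalized)), sorted(missing), tc_covered_stems
-- ===== SOURCE B (Python) =====
-- def _scenario_stem(canonical_id: str) -> str:
--     if not canonical_id:
--         return ""
--     parts = canonical_id.split("_")
--     if len(parts) <= 2:
--         return canonical_id
--     return "_".join([parts[0], parts[-1]]) if parts else ""
--
-- def _deduplicate_canonicals(ac_ids, tc_ids):
--     # Flat, dict-free formulation: no grouping structure at all. An id is
--     # canonical iff it is minimal under (len, lexicographic) among all ids
--     # sharing its stem; everything is a filter over the flat id list.
--     all_ids = [c for c in ac_ids + tc_ids if c]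
--     ac_stems = {_scenario_stem(c) for c in ac_ids if c}
--     tc_stems = {_scenario_stem(c) for c in tc_ids if c}
--
--     def minimal(x):
--         return all((len(x), x) <= (len(y), y)
--                    for y in all_ids if _scenario_stem(y) == _scenario_stem(x))
--
--     normalized = sorted({x for x in all_ids if minimal(x)})
--     missing = sorted({x for x in all_ids if minimal(x)
--                       and _scenario_stem(x) in ac_stems
--                       and _scenario_stem(x) not in tc_stems})
--     tc_covered = {s for s in map(_scenario_stem, all_ids) if s in tc_stems}
--     return normalized, missing, tc_covered
-- ===== Notes on version B (the rewrite author's own statement) =====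
-- stated objective: alternative
-- what changed: Drops A's stem-keyed grouping dict and its per-group set/min/any pass entirely: B characterises a canonical id as one that is (len, lexicographic)-minimal among all ids sharing its stem, so each output is a direct filter/comprehension over the flat id list plus two precomputed stem sets.
import Mathlib
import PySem

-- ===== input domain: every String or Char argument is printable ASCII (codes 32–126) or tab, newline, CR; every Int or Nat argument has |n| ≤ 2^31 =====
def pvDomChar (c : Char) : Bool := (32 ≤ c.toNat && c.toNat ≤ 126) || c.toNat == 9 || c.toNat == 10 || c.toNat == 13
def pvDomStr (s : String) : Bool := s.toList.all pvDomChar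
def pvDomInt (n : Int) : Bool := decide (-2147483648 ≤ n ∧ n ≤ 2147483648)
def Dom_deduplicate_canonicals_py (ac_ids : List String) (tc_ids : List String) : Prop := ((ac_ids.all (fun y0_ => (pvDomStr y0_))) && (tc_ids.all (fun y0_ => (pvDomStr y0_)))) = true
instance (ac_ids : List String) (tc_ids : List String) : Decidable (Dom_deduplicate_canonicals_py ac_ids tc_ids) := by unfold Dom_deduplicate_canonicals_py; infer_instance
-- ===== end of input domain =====

-- B drops A's stem-keyed grouping dict and its per-group set/min/any pass: an id is canonical
-- iff it is (len, lexicographic)-minimal among all ids sharing its stem, so each output is a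
-- direct filter over the flat id list plus two precomputed stem sets (objective: alternative).

-- ===== PORT A =====
-- helper _scenario_stem (shared verbatim by A and B, as in the Python sources)
def scenario_stem (canonical_id : String) : String :=
  if canonical_id == "" then ""
  else
    let parts := (PySem.Str.split? canonical_id "_").getD []   -- sep "_" ≠ "", never none
    if parts.length ≤ 2 then canonical_id
    else if parts ≠ [] then
      PySem.Str.join "_" [(PySem.List.pyGet? parts 0).getD "", (PySem.List.pyGet? parts (-1)).getD ""]
    else ""

-- one iteration of A's grouping loops (the two Python loops are identical up to the source tag)
def groupAdd (tag : String) (groups : PySem.Dict String (List (String × String))) (cid : String) :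
    PySem.Dict String (List (String × String)) :=
  if cid == "" then groups
  else
    let stem := scenario_stem cid
    let groups := if groups.contains stem then groups else groups.insert stem []
    groups.modify stem [] (fun l => l ++ [(cid, tag)])

-- body of A's final 'for stem, pairs in groups.items()' loop
def finStepA (acc : List String × List String × PySem.Set String) (kv : String × List (String × String)) :
    List String × List String × PySem.Set String :=
  let stem := kv.1
  let pairs := kv.2
  let canonical_ids : List String := PySem.Set.ofList (pairs.map (·.1))
  let chosen := (PySem.List.min2? canonical_ids (fun x => PySem.Str.len x) (fun x => x)).getD ""   -- min over a nonempty group, never none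
  let normalized := acc.1 ++ [chosen]
  let has_ac := pairs.any (fun p => p.2 == "ac")
  let has_tc := pairs.any (fun p => p.2 == "tc")
  let tc_covered := if has_tc then PySem.Set.add acc.2.2 stem else acc.2.2
  let missing := if has_ac && !has_tc then acc.2.1 ++ [chosen] else acc.2.1
  (normalized, missing, tc_covered)

def deduplicate_canonicals_py (ac_ids : List String) (tc_ids : List String) : List String × List String × List String :=
  let groups := ac_ids.foldl (groupAdd "ac") PySem.Dict.empty
  let groups := tc_ids.foldl (groupAdd "tc") groups
  let res := groups.items.foldl finStepA ([], [], [])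
  (PySem.List.sorted (PySem.Set.ofList res.1) (fun x => x) false,
   PySem.List.sorted res.2.1 (fun x => x) false,
   res.2.2)

-- ===== PORT B =====
-- Python tuple comparison (len(x), x) <= (len(y), y)
def tupLE (x y : String) : Bool :=
  decide (PySem.Str.len x < PySem.Str.len y ∨ (PySem.Str.len x = PySem.Str.len y ∧ x ≤ y))

def deduplicate_canonicals_py_alt (ac_ids : List String) (tc_ids : List String) : List String × List String × List String :=
  let all_ids := (ac_ids ++ tc_ids).filter (fun c => !(c == ""))
  let ac_stems : PySem.Set String := PySem.Set.ofList ((ac_ids.filter (fun c => !(c == ""))).map scenario_stem)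
  let tc_stems : PySem.Set String := PySem.Set.ofList ((tc_ids.filter (fun c => !(c == ""))).map scenario_stem)
  let minimal : String → Bool := fun x =>
    (all_ids.filter (fun y => scenario_stem y == scenario_stem x)).all (fun y => tupLE x y)
  (PySem.List.sorted (PySem.Set.ofList (all_ids.filter minimal)) (fun x => x) false,
   PySem.List.sorted (PySem.Set.ofList (all_ids.filter (fun x => minimal x &&
       (PySem.Set.contains ac_stems (scenario_stem x) && !PySem.Set.contains tc_stems (scenario_stem x)))))
     (fun x => x) false,
   PySem.Set.ofList ((all_ids.map scenario_stem).filter (fun s => PySem.Set.contains tc_stems s)))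

-- ===== PRECONDITION & SPEC =====
def Spec_deduplicate_canonicals_py (ac_ids : List String) (tc_ids : List String) (out : List String × List String × List String) : Prop := out = deduplicate_canonicals_py_alt ac_ids tc_ids
instance (ac_ids : List String) (tc_ids : List String) (out : List String × List String × List String) : Decidable (Spec_deduplicate_canonicals_py ac_ids tc_ids out) := by unfold Spec_deduplicate_canonicals_py; infer_instance

-- ===== CLAIM (what is proved, stated in full; the proofs are below) =====
def Claim_equal_deduplicate_canonicals_py : Prop := ∀ (ac_ids : List String) (tc_ids : List String), Dom_deduplicate_canonicals_py ac_ids tc_ids → Spec_deduplicate_canonicals_py ac_ids tc_ids (deduplicate_canonicals_py ac_ids tc_ids)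

-- ===== LEMMAS AND PROOFS =====

-- the flat list of nonempty ids, the tagged list A folds over, and the group of a stem
def pvAll (ac_ids tc_ids : List String) : List String :=
  (ac_ids ++ tc_ids).filter (fun c => !(c == ""))

def pvTagged (ac_ids tc_ids : List String) : List (String × String) :=
  (ac_ids.map (fun c => (c, "ac")) ++ tc_ids.map (fun c => (c, "tc"))).filter (fun ct => !(ct.1 == ""))

def pvPairs (ac_ids tc_ids : List String) (s : String) : List (String × String) :=
  (pvTagged ac_ids tc_ids).filter (fun ct => scenario_stem ct.1 == s)

def pvGrp (ac_ids tc_ids : List String) (s : String) : List String :=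
  (pvAll ac_ids tc_ids).filter (fun y => scenario_stem y == s)

-- the value A's final loop extracts from a group
def pvCh (kv : String × List (String × String)) : String :=
  (PySem.List.min2? (PySem.Set.ofList (kv.2.map (·.1))) (fun x => PySem.Str.len x) (fun x => x)).getD ""

theorem pvTagged_map_fst (ac_ids tc_ids : List String) :
    (pvTagged ac_ids tc_ids).map (·.1) = pvAll ac_ids tc_ids := by
  simp [pvTagged, pvAll, List.filter_map, Function.comp_def]

theorem pvPairs_map_fst (ac_ids tc_ids : List String) (s : String) :
    (pvPairs ac_ids tc_ids s).map (·.1) = pvGrp ac_ids tc_ids s := by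
  have : pvPairs ac_ids tc_ids s = (pvTagged ac_ids tc_ids).filter ((fun y => scenario_stem y == s) ∘ (·.1)) := rfl
  rw [this, ← List.filter_map, pvTagged_map_fst]; rfl

-- groupAdd is a guarded Dict.modify
theorem groupAdd_eq_modify (tag : String) (g : PySem.Dict String (List (String × String))) (cid : String) :
    groupAdd tag g cid =
      if (!(cid == "")) = true then g.modify (scenario_stem cid) [] (fun l => l ++ [(cid, tag)]) else g := by
  obtain ⟨items⟩ := g
  unfold groupAdd
  by_cases h0 : cid == ""
  · simp [h0]
  · simp only [h0, Bool.false_eq_true, if_false, Bool.not_false, if_true]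
    by_cases hc : (PySem.Dict.mk items : PySem.Dict String (List (String × String))).contains (scenario_stem cid) = true
    · simp [hc]
    · have hnot : ∀ p ∈ items, p.1 ≠ scenario_stem cid := by
        intro p hp hpe
        apply hc
        show (items.any fun p => p.1 == scenario_stem cid) = true
        exact List.any_eq_true.mpr ⟨p, hp, by simp [hpe]⟩
      have hfind : items.find? (fun p => p.1 == scenario_stem cid) = none :=
        List.find?_eq_none.mpr (fun p hp => by simp [hnot p hp])
      have hget : (PySem.Dict.mk items : PySem.Dict String (List (String × String))).getD (scenario_stem cid) [] = [] := by
        have hq : (PySem.Dict.mk items : PySem.Dict String (List (String × String))).get? (scenario_stem cid) = none := by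
          simp [PySem.Dict.get?, hfind]
        rw [PySem.Dict.getD_eq_get?_getD, hq]
        rfl
      have hget2 : ((PySem.Dict.mk items : PySem.Dict String (List (String × String))).insert (scenario_stem cid) []).getD (scenario_stem cid) [] = [] := by
        rw [PySem.Dict.getD_eq_get?_getD, PySem.Dict.get?_insert_self]
        rfl
      rw [if_neg hc]
      show ((PySem.Dict.mk items : PySem.Dict String (List (String × String))).insert (scenario_stem cid) []).modify
            (scenario_stem cid) [] (fun l => l ++ [(cid, tag)])
          = (PySem.Dict.mk items : PySem.Dict String (List (String × String))).modify
            (scenario_stem cid) [] (fun l => l ++ [(cid, tag)])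
      simp only [PySem.Dict.modify, hget, hget2]
      rw [PySem.Dict.insert_insert_self]

-- A's grouping fold, in closed form
theorem groups_items (ac_ids tc_ids : List String) :
    (tc_ids.foldl (groupAdd "tc") (ac_ids.foldl (groupAdd "ac") PySem.Dict.empty)).items
      = (PySem.Set.ofList ((pvAll ac_ids tc_ids).map scenario_stem)).map
          (fun s => (s, pvPairs ac_ids tc_ids s)) := by
  have e1 : tc_ids.foldl (groupAdd "tc") (ac_ids.foldl (groupAdd "ac") PySem.Dict.empty)
      = (ac_ids.map (fun c => (c, "ac")) ++ tc_ids.map (fun c => (c, "tc"))).foldl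
          (fun g ct => groupAdd ct.2 g ct.1) PySem.Dict.empty := by
    rw [List.foldl_append, List.foldl_map, List.foldl_map]
  have e2 : (ac_ids.map (fun c => (c, "ac")) ++ tc_ids.map (fun c => (c, "tc"))).foldl
        (fun g ct => groupAdd ct.2 g ct.1) PySem.Dict.empty
      = (pvTagged ac_ids tc_ids).foldl
          (fun g ct => g.modify (scenario_stem ct.1) [] (fun l => l ++ [ct])) PySem.Dict.empty := by
    unfold pvTagged
    have hstep : (fun (g : PySem.Dict String (List (String × String))) (ct : String × String) => groupAdd ct.2 g ct.1)
        = fun g ct => if (!(ct.1 == "")) = true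
            then g.modify (scenario_stem ct.1) [] (fun l => l ++ [ct]) else g := by
      funext g ct
      rw [groupAdd_eq_modify]
    rw [hstep, PySem.List.foldl_if_eq_foldl_filter]
  have e3 : (pvTagged ac_ids tc_ids).foldl
        (fun g ct => g.modify (scenario_stem ct.1) [] (fun l => l ++ [ct])) PySem.Dict.empty
      = ((pvTagged ac_ids tc_ids).map (fun ct => (scenario_stem ct.1, ct))).foldl
          (fun d p => d.modify p.1 [] (fun l => l ++ [p.2])) PySem.Dict.empty := by
    rw [List.foldl_map]
  set L := (pvTagged ac_ids tc_ids).map (fun ct => (scenario_stem ct.1, ct)) with hL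
  have hkeys : (L.foldl (fun d p => d.modify p.1 [] (fun l => l ++ [p.2])) PySem.Dict.empty).keys
      = PySem.Set.ofList ((pvAll ac_ids tc_ids).map scenario_stem) := by
    rw [PySem.Dict.keys_foldl_modify_key L (fun p => p.1) [] (fun _ p v => v ++ [p.2])]
    have : (PySem.Dict.empty : PySem.Dict String (List (String × String))).keys = PySem.Set.empty := rfl
    rw [this, PySem.Set.update_empty, hL, List.map_map]
    have : ((fun p => p.1) ∘ fun ct => (scenario_stem ct.1, ct))
        = scenario_stem ∘ (fun ct : String × String => ct.1) := rfl
    rw [this, ← List.map_map, pvTagged_map_fst]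
  have hnodup : (L.foldl (fun d p => d.modify p.1 [] (fun l => l ++ [p.2])) PySem.Dict.empty).keys.Nodup := by
    refine PySem.Dict.nodup_keys_foldl_modify_key L (fun p => p.1) [] (fun _ p v => v ++ [p.2]) _ ?_
    simp [PySem.Dict.empty, PySem.Dict.keys]
  have hgetD : ∀ s, (L.foldl (fun d p => d.modify p.1 [] (fun l => l ++ [p.2])) PySem.Dict.empty).getD s []
      = pvPairs ac_ids tc_ids s := by
    intro s
    rw [PySem.Dict.getD_foldl_modify_append]
    have : (PySem.Dict.empty : PySem.Dict String (List (String × String))).getD s [] = [] := rfl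
    rw [this, List.nil_append, hL, List.filter_map]
    have : ((fun p : String × (String × String) => p.1 == s) ∘ fun ct => (scenario_stem ct.1, ct))
        = fun ct : String × String => scenario_stem ct.1 == s := rfl
    rw [this, List.map_map]
    simp only [Function.comp_def]
    simp [pvPairs]
  rw [e1, e2, e3, PySem.Dict.items_eq_map_keys _ hnodup [], hkeys]
  exact List.map_congr_left (fun s _ => by rw [hgetD s])

-- A's final fold, in closed form
theorem foldA_closed (items : List (String × List (String × String)))
    (a b : List String) (c : PySem.Set String) :
    items.foldl finStepA (a, b, c)
      = (a ++ items.map pvCh,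
         b ++ (items.filter (fun kv => kv.2.any (fun p => p.2 == "ac") && !kv.2.any (fun p => p.2 == "tc"))).map pvCh,
         items.foldl (fun s kv => if kv.2.any (fun p => p.2 == "tc") then PySem.Set.add s kv.1 else s) c) := by
  induction items generalizing a b c with
  | nil => simp
  | cons kv t ih =>
    simp only [List.foldl_cons, List.filter_cons]
    rw [show finStepA (a, b, c) kv
        = (a ++ [pvCh kv],
           if kv.2.any (fun p => p.2 == "ac") && !kv.2.any (fun p => p.2 == "tc") then b ++ [pvCh kv] else b,
           if kv.2.any (fun p => p.2 == "tc") then PySem.Set.add c kv.1 else c) from rfl]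
    rw [ih]
    by_cases hac : kv.2.any (fun p => p.2 == "ac") <;>
      by_cases htc : kv.2.any (fun p => p.2 == "tc") <;>
        simp [hac, htc]

-- key-order facts
def pvKLE (x y : String) : Prop :=
  PySem.Str.len x < PySem.Str.len y ∨ (PySem.Str.len x = PySem.Str.len y ∧ x ≤ y)

theorem tupLE_iff (x y : String) : tupLE x y = true ↔ pvKLE x y := by
  simp [tupLE, pvKLE]

theorem pvKLE_refl (x : String) : pvKLE x x := Or.inr ⟨rfl, le_refl x⟩

theorem pvKLE_trans {x y z : String} (h1 : pvKLE x y) (h2 : pvKLE y z) : pvKLE x z := by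
  rcases h1 with h1 | ⟨e1, l1⟩ <;> rcases h2 with h2 | ⟨e2, l2⟩
  · exact Or.inl (lt_trans h1 h2)
  · exact Or.inl (e2 ▸ h1)
  · exact Or.inl (e1 ▸ h2)
  · exact Or.inr ⟨e1.trans e2, le_trans l1 l2⟩

theorem pvKLE_antisymm {x y : String} (h1 : pvKLE x y) (h2 : pvKLE y x) : x = y := by
  rcases h1 with h1 | ⟨e1, l1⟩ <;> rcases h2 with h2 | ⟨e2, l2⟩
  · omega
  · omega
  · omega
  · exact le_antisymm l1 l2

-- min2? on a nonempty list of strings returns a pvKLE-minimum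
theorem min2_step (m x : String) (t : List String) :
    ∃ c, PySem.List.min2? (m :: x :: t) (fun x => PySem.Str.len x) (fun x => x)
        = PySem.List.min2? (c :: t) (fun x => PySem.Str.len x) (fun x => x)
      ∧ (c = m ∨ c = x) ∧ pvKLE c m ∧ pvKLE c x := by
  unfold PySem.List.min2?
  rw [List.foldl_cons, List.foldl_cons]
  change ∃ c, List.foldl _ (if (decide (PySem.Str.len x < PySem.Str.len m)
      || !decide (PySem.Str.len m < PySem.Str.len x) && decide (x < m)) = true
      then some x else some m) t = _ ∧ _
  by_cases h : (decide (PySem.Str.len x < PySem.Str.len m)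
      || !decide (PySem.Str.len m < PySem.Str.len x) && decide (x < m)) = true
  · rw [if_pos h]
    refine ⟨x, rfl, Or.inr rfl, ?_, pvKLE_refl x⟩
    rcases Bool.or_eq_true_iff.mp h with h | h
    · exact Or.inl (of_decide_eq_true h)
    · rcases Bool.and_eq_true_iff.mp h with ⟨h1, h2⟩
      have h1' : ¬ PySem.Str.len m < PySem.Str.len x := by
        intro hlt
        rw [decide_eq_true hlt] at h1
        simp at h1
      have h2' : x < m := of_decide_eq_true h2
      rcases lt_trichotomy (PySem.Str.len x) (PySem.Str.len m) with hl | hl | hl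
      · exact Or.inl hl
      · exact Or.inr ⟨hl, le_of_lt h2'⟩
      · exact absurd hl h1'
  · rw [if_neg h]
    refine ⟨m, rfl, Or.inl rfl, pvKLE_refl m, ?_⟩
    rcases lt_trichotomy (PySem.Str.len m) (PySem.Str.len x) with hl | hl | hl
    · exact Or.inl hl
    · refine Or.inr ⟨hl, ?_⟩
      by_contra hxm
      apply h
      have h1 : ¬ PySem.Str.len m < PySem.Str.len x := by omega
      have h2 : x < m := lt_of_not_ge hxm
      exact Bool.or_eq_true_iff.mpr (Or.inr (Bool.and_eq_true_iff.mpr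
        ⟨by
          have hl' := hl
          simp [PySem.Str.len_eq] at hl' ⊢
          omega, decide_eq_true h2⟩))
    · exact absurd (Bool.or_eq_true_iff.mpr (Or.inl (decide_eq_true hl))) h

theorem min2_aux (t : List String) (m : String) :
    ∃ m', PySem.List.min2? (m :: t) (fun x => PySem.Str.len x) (fun x => x) = some m'
      ∧ m' ∈ m :: t ∧ ∀ y ∈ m :: t, pvKLE m' y := by
  induction t generalizing m with
  | nil => exact ⟨m, rfl, by simp, by simp [pvKLE_refl]⟩
  | cons x t ih =>
    obtain ⟨c, heq, hc, hcm, hcx⟩ := min2_step m x t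
    obtain ⟨m', e, hmem, hall⟩ := ih c
    have hmc : pvKLE m' c := hall c List.mem_cons_self
    refine ⟨m', heq.trans e, ?_, ?_⟩
    · rcases List.mem_cons.mp hmem with rfl | hmt
      · rcases hc with rfl | rfl
        · exact List.mem_cons_self
        · exact List.mem_cons_of_mem _ List.mem_cons_self
      · exact List.mem_cons_of_mem _ (List.mem_cons_of_mem _ hmt)
    · intro y hy
      rcases List.mem_cons.mp hy with rfl | hy
      · exact pvKLE_trans hmc hcm
      · rcases List.mem_cons.mp hy with rfl | hy
        · exact pvKLE_trans hmc hcx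
        · exact hall y (List.mem_cons_of_mem _ hy)

theorem min2_spec (l : List String) (hne : l ≠ []) :
    ∃ m, PySem.List.min2? l (fun x => PySem.Str.len x) (fun x => x) = some m ∧
      m ∈ l ∧ ∀ y ∈ l, pvKLE m y := by
  cases l with
  | nil => exact absurd rfl hne
  | cons x t =>
    obtain ⟨m', e, hmem, hall⟩ := min2_aux t x
    exact ⟨m', e, hmem, hall⟩

-- the chosen element of a nonempty group: member and pvKLE-minimal
theorem pvCh_spec (ac_ids tc_ids : List String) (s : String)
    (hne : pvGrp ac_ids tc_ids s ≠ []) :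
    pvCh (s, pvPairs ac_ids tc_ids s) ∈ pvGrp ac_ids tc_ids s ∧
      ∀ y ∈ pvGrp ac_ids tc_ids s, pvKLE (pvCh (s, pvPairs ac_ids tc_ids s)) y := by
  have hmap := pvPairs_map_fst ac_ids tc_ids s
  have hne' : (PySem.Set.ofList ((pvPairs ac_ids tc_ids s).map (·.1)) : List String) ≠ [] := by
    rw [hmap]
    intro h
    rcases List.exists_mem_of_ne_nil _ hne with ⟨y, hy⟩
    have : y ∈ (PySem.Set.ofList (pvGrp ac_ids tc_ids s) : List String) :=
      (PySem.Set.mem_ofList _ _).mpr hy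
    simp [h] at this
  obtain ⟨m, hm, hmem, hmin⟩ := min2_spec _ hne'
  have heq : pvCh (s, pvPairs ac_ids tc_ids s) = m := by
    simp only [pvCh]
    rw [hm]
    rfl
  rw [hmap] at hmem hmin
  rw [heq]
  exact ⟨(PySem.Set.mem_ofList _ _).mp hmem, fun y hy => hmin y ((PySem.Set.mem_ofList _ _).mpr hy)⟩

-- group membership facts
theorem stem_eq_of_mem_grp {ac_ids tc_ids : List String} {s x : String}
    (h : x ∈ pvGrp ac_ids tc_ids s) : scenario_stem x = s := by
  have := (List.mem_filter.mp h).2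
  simpa using this

theorem mem_all_of_mem_grp {ac_ids tc_ids : List String} {s x : String}
    (h : x ∈ pvGrp ac_ids tc_ids s) : x ∈ pvAll ac_ids tc_ids :=
  (List.mem_filter.mp h).1

theorem mem_grp_self {ac_ids tc_ids : List String} {x : String}
    (h : x ∈ pvAll ac_ids tc_ids) : x ∈ pvGrp ac_ids tc_ids (scenario_stem x) :=
  List.mem_filter.mpr ⟨h, by simp⟩

theorem grp_ne_nil_of_mem_keys {ac_ids tc_ids : List String} {s : String}
    (h : s ∈ (PySem.Set.ofList ((pvAll ac_ids tc_ids).map scenario_stem) : List String)) :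
    pvGrp ac_ids tc_ids s ≠ [] := by
  rw [PySem.Set.mem_ofList] at h
  rcases List.mem_map.mp h with ⟨x, hx, rfl⟩
  exact List.ne_nil_of_mem (mem_grp_self hx)

theorem stem_mem_keys {ac_ids tc_ids : List String} {x : String}
    (h : x ∈ pvAll ac_ids tc_ids) :
    scenario_stem x ∈ (PySem.Set.ofList ((pvAll ac_ids tc_ids).map scenario_stem) : List String) := by
  rw [PySem.Set.mem_ofList]
  exact List.mem_map.mpr ⟨x, h, rfl⟩

theorem stem_pvCh {ac_ids tc_ids : List String} {s : String}
    (h : s ∈ (PySem.Set.ofList ((pvAll ac_ids tc_ids).map scenario_stem) : List String)) :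
    scenario_stem (pvCh (s, pvPairs ac_ids tc_ids s)) = s :=
  stem_eq_of_mem_grp ((pvCh_spec ac_ids tc_ids s (grp_ne_nil_of_mem_keys h)).1)

-- B's minimality test, characterised
theorem pvMinimal_iff (ac_ids tc_ids : List String) (x : String) :
    (((pvAll ac_ids tc_ids).filter (fun y => scenario_stem y == scenario_stem x)).all
        (fun y => tupLE x y)) = true
      ↔ ∀ y ∈ pvGrp ac_ids tc_ids (scenario_stem x), pvKLE x y := by
  rw [List.all_eq_true]
  constructor
  · intro h y hy
    exact (tupLE_iff x y).mp (h y hy)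
  · intro h y hy
    exact (tupLE_iff x y).mpr (h y hy)

-- an id is one of A's chosen canonicals iff it is a pvKLE-minimal member of its stem group
theorem mem_canon_iff (ac_ids tc_ids : List String) (x : String) :
    x ∈ ((PySem.Set.ofList ((pvAll ac_ids tc_ids).map scenario_stem) : List String).map
          (fun s => pvCh (s, pvPairs ac_ids tc_ids s)))
      ↔ x ∈ pvAll ac_ids tc_ids ∧ ∀ y ∈ pvGrp ac_ids tc_ids (scenario_stem x), pvKLE x y := by
  constructor
  · intro h
    rcases List.mem_map.mp h with ⟨s, hs, rfl⟩
    obtain ⟨hmem, hmin⟩ := pvCh_spec ac_ids tc_ids s (grp_ne_nil_of_mem_keys hs)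
    have hst : scenario_stem (pvCh (s, pvPairs ac_ids tc_ids s)) = s := stem_eq_of_mem_grp hmem
    exact ⟨mem_all_of_mem_grp hmem, by rw [hst]; exact hmin⟩
  · intro ⟨hall, hmin⟩
    have hs := stem_mem_keys hall
    obtain ⟨hmem, hminc⟩ := pvCh_spec ac_ids tc_ids (scenario_stem x) (grp_ne_nil_of_mem_keys hs)
    have hx : x = pvCh (scenario_stem x, pvPairs ac_ids tc_ids (scenario_stem x)) :=
      pvKLE_antisymm (hmin _ hmem) (hminc x (mem_grp_self hall))
    exact List.mem_map.mpr ⟨scenario_stem x, hs, hx.symm⟩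

-- the source flags of a group are stem-set membership tests
theorem pairs_any_tc (ac_ids tc_ids : List String) (s : String) :
    ((pvPairs ac_ids tc_ids s).any fun p => p.2 == "tc")
      = PySem.Set.contains
          (PySem.Set.ofList ((tc_ids.filter (fun c => !(c == ""))).map scenario_stem)) s := by
  rw [Bool.eq_iff_iff, List.any_eq_true, PySem.Set.contains_iff, PySem.Set.mem_ofList]
  constructor
  · rintro ⟨p, hp, htag⟩
    simp only [pvPairs, pvTagged] at hp
    rcases List.mem_filter.mp hp with ⟨hbig, hst⟩
    rcases List.mem_filter.mp hbig with ⟨hmem, hne⟩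
    rcases List.mem_append.mp hmem with h | h
    · rcases List.mem_map.mp h with ⟨c, _, rfl⟩
      simp at htag
    · rcases List.mem_map.mp h with ⟨c, hc, rfl⟩
      refine List.mem_map.mpr ⟨c, List.mem_filter.mpr ⟨hc, hne⟩, ?_⟩
      simpa using hst
  · intro h
    rcases List.mem_map.mp h with ⟨c, hc, rfl⟩
    rcases List.mem_filter.mp hc with ⟨hc1, hc2⟩
    refine ⟨(c, "tc"), ?_, by simp⟩
    simp only [pvPairs, pvTagged]
    exact List.mem_filter.mpr ⟨List.mem_filter.mpr
      ⟨List.mem_append.mpr (Or.inr (List.mem_map.mpr ⟨c, hc1, rfl⟩)), hc2⟩, by simp⟩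

theorem pairs_any_ac (ac_ids tc_ids : List String) (s : String) :
    ((pvPairs ac_ids tc_ids s).any fun p => p.2 == "ac")
      = PySem.Set.contains
          (PySem.Set.ofList ((ac_ids.filter (fun c => !(c == ""))).map scenario_stem)) s := by
  rw [Bool.eq_iff_iff, List.any_eq_true, PySem.Set.contains_iff, PySem.Set.mem_ofList]
  constructor
  · rintro ⟨p, hp, htag⟩
    simp only [pvPairs, pvTagged] at hp
    rcases List.mem_filter.mp hp with ⟨hbig, hst⟩
    rcases List.mem_filter.mp hbig with ⟨hmem, hne⟩
    rcases List.mem_append.mp hmem with h | h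
    · rcases List.mem_map.mp h with ⟨c, hc, rfl⟩
      refine List.mem_map.mpr ⟨c, List.mem_filter.mpr ⟨hc, hne⟩, ?_⟩
      simpa using hst
    · rcases List.mem_map.mp h with ⟨c, _, rfl⟩
      simp at htag
  · intro h
    rcases List.mem_map.mp h with ⟨c, hc, rfl⟩
    rcases List.mem_filter.mp hc with ⟨hc1, hc2⟩
    refine ⟨(c, "ac"), ?_, by simp⟩
    simp only [pvPairs, pvTagged]
    exact List.mem_filter.mpr ⟨List.mem_filter.mpr
      ⟨List.mem_append.mpr (Or.inl (List.mem_map.mpr ⟨c, hc1, rfl⟩)), hc2⟩, by simp⟩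

-- set(filter) = filter(set)
theorem ofList_filter (p : String → Bool) (l : List String) :
    PySem.Set.ofList (l.filter p) = (PySem.Set.ofList l : List String).filter p := by
  induction l using List.reverseRecOn with
  | nil => rfl
  | append_singleton xs x ih =>
    rw [List.filter_append, PySem.Set.ofList_append_singleton]
    by_cases hp : p x = true
    · have hfx : List.filter p [x] = [x] := by simp [hp]
      rw [hfx, PySem.Set.ofList_append_singleton, ih]
      by_cases hm : x ∈ (PySem.Set.ofList xs : List String)
      · rw [PySem.Set.add_of_mem hm, PySem.Set.add_of_mem (by
          rw [List.mem_filter]; exact ⟨hm, hp⟩)]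
      · rw [PySem.Set.add_of_not_mem hm, PySem.Set.add_of_not_mem (by
          rw [List.mem_filter]; exact fun h => hm h.1), List.filter_append, hfx]
    · have hfx : List.filter p [x] = [] := by simp [hp]
      rw [hfx, List.append_nil, ih, PySem.Set.add_eq_ite]
      by_cases hm : x ∈ (PySem.Set.ofList xs : List String)
      · rw [if_pos hm]
      · rw [if_neg hm, List.filter_append, hfx, List.append_nil]

-- a conditional Set.add loop over fresh distinct keys is a filter
theorem foldl_add_if_of_nodup (p : String → Bool) (l : List String) (a : PySem.Set String)
    (hn : l.Nodup) (hd : ∀ x ∈ l, x ∉ a) :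
    l.foldl (fun s k => if p k then PySem.Set.add s k else s) a = a ++ l.filter p := by
  induction l generalizing a with
  | nil => simp
  | cons x t ih =>
    rcases List.nodup_cons.mp hn with ⟨hx, hn'⟩
    by_cases hp : p x
    · rw [List.foldl_cons, if_pos hp,
        PySem.Set.add_of_not_mem (hd x (List.mem_cons_self)),
        ih (a ++ [x]) hn' ?_, List.filter_cons, if_pos hp]
      · simp
      · intro y hy
        rw [List.mem_append]
        rintro (h | h)
        · exact hd y (List.mem_cons_of_mem _ hy) h
        · rcases List.mem_singleton.mp h with rfl
          exact hx hy
    · rw [List.foldl_cons, if_neg hp, ih a hn'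
        (fun y hy => hd y (List.mem_cons_of_mem _ hy)), List.filter_cons]
      simp [hp]

-- an id is one of A's missing canonicals iff it is canonical with ac-covered, tc-uncovered stem
theorem mem_missing_iff (ac_ids tc_ids : List String) (x : String) :
    x ∈ (((PySem.Set.ofList ((pvAll ac_ids tc_ids).map scenario_stem) : List String).filter
            (fun s => (pvPairs ac_ids tc_ids s).any (fun p => p.2 == "ac")
              && !(pvPairs ac_ids tc_ids s).any (fun p => p.2 == "tc"))).map
          (fun s => pvCh (s, pvPairs ac_ids tc_ids s)))
      ↔ x ∈ pvAll ac_ids tc_ids ∧ (∀ y ∈ pvGrp ac_ids tc_ids (scenario_stem x), pvKLE x y)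
          ∧ ((pvPairs ac_ids tc_ids (scenario_stem x)).any (fun p => p.2 == "ac")
              && !(pvPairs ac_ids tc_ids (scenario_stem x)).any (fun p => p.2 == "tc")) = true := by
  constructor
  · intro h
    rcases List.mem_map.mp h with ⟨s, hs, rfl⟩
    rcases List.mem_filter.mp hs with ⟨hk, hcond⟩
    obtain ⟨hmem, hmin⟩ := pvCh_spec ac_ids tc_ids s (grp_ne_nil_of_mem_keys hk)
    have hst : scenario_stem (pvCh (s, pvPairs ac_ids tc_ids s)) = s := stem_eq_of_mem_grp hmem
    exact ⟨mem_all_of_mem_grp hmem, by rw [hst]; exact hmin, by rw [hst]; exact hcond⟩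
  · intro ⟨hall, hmin, hcond⟩
    have hs := stem_mem_keys hall
    obtain ⟨hmem, hminc⟩ := pvCh_spec ac_ids tc_ids (scenario_stem x) (grp_ne_nil_of_mem_keys hs)
    have hx : x = pvCh (scenario_stem x, pvPairs ac_ids tc_ids (scenario_stem x)) :=
      pvKLE_antisymm (hmin _ hmem) (hminc x (mem_grp_self hall))
    exact List.mem_map.mpr ⟨scenario_stem x, List.mem_filter.mpr ⟨hs, hcond⟩, hx.symm⟩

-- ===== VERDICT (by name: the statement is the Claim_ definition above) =====
theorem deduplicate_canonicals_py_spec : Claim_equal_deduplicate_canonicals_py := by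
  intro ac_ids tc_ids _
  unfold Spec_deduplicate_canonicals_py deduplicate_canonicals_py deduplicate_canonicals_py_alt
  simp only []
  rw [groups_items, foldA_closed]
  have hkeysnd : (PySem.Set.ofList ((pvAll ac_ids tc_ids).map scenario_stem) : List String).Nodup :=
    PySem.Set.nodup_ofList _
  simp only [Prod.mk.injEq]
  refine ⟨?_, ?_, ?_⟩
  · -- normalized
    rw [List.nil_append, List.map_map]
    apply PySem.List.sorted_eq_sorted_of_perm _ _ _ (fun _ _ h => h)
    apply (List.perm_ext_iff_of_nodup (PySem.Set.nodup_ofList _) (PySem.Set.nodup_ofList _)).mpr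
    intro x
    rw [PySem.Set.mem_ofList, PySem.Set.mem_ofList, List.mem_filter]
    have hco : (pvCh ∘ fun s => (s, pvPairs ac_ids tc_ids s))
        = fun s => pvCh (s, pvPairs ac_ids tc_ids s) := rfl
    rw [hco, mem_canon_iff]
    constructor
    · intro ⟨h1, h2⟩
      exact ⟨by simpa [pvAll] using h1, (pvMinimal_iff ac_ids tc_ids x).mpr (by
        intro y hy
        exact h2 y (by simpa [pvGrp, pvAll] using hy))⟩
    · intro ⟨h1, h2⟩
      refine ⟨by simpa [pvAll] using h1, ?_⟩
      intro y hy
      exact (pvMinimal_iff ac_ids tc_ids x).mp (by simpa [pvAll] using h2) y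
        (by simpa [pvGrp, pvAll] using hy)
  · -- missing
    rw [List.nil_append, List.filter_map, List.map_map]
    apply PySem.List.sorted_eq_sorted_of_perm _ _ _ (fun _ _ h => h)
    apply (List.perm_ext_iff_of_nodup ?_ (PySem.Set.nodup_ofList _)).mpr
    · intro x
      rw [PySem.Set.mem_ofList, List.mem_filter]
      have hco : ((fun kv : String × List (String × String) =>
            kv.2.any (fun p => p.2 == "ac") && !kv.2.any (fun p => p.2 == "tc"))
          ∘ fun s => (s, pvPairs ac_ids tc_ids s))
          = fun s => (pvPairs ac_ids tc_ids s).any (fun p => p.2 == "ac")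
              && !(pvPairs ac_ids tc_ids s).any (fun p => p.2 == "tc") := rfl
      have hco2 : (pvCh ∘ fun s => (s, pvPairs ac_ids tc_ids s))
          = fun s => pvCh (s, pvPairs ac_ids tc_ids s) := rfl
      rw [hco, hco2, mem_missing_iff]
      rw [pairs_any_ac, pairs_any_tc]
      constructor
      · intro ⟨h1, h2, h3⟩
        refine ⟨by simpa [pvAll] using h1, ?_⟩
        rw [Bool.and_eq_true]
        refine ⟨(pvMinimal_iff ac_ids tc_ids x).mpr (by
          intro y hy
          exact h2 y (by simpa [pvGrp, pvAll] using hy)), h3⟩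
      · intro ⟨h1, h2⟩
        rw [Bool.and_eq_true] at h2
        refine ⟨by simpa [pvAll] using h1, ?_, h2.2⟩
        intro y hy
        exact (pvMinimal_iff ac_ids tc_ids x).mp (by simpa [pvAll] using h2.1) y
          (by simpa [pvGrp, pvAll] using hy)
    · refine List.Nodup.map_on ?_ (List.Nodup.filter _ hkeysnd)
      intro s hs s' hs' he
      have h1 : scenario_stem (pvCh (s, pvPairs ac_ids tc_ids s)) = s :=
        stem_pvCh (List.mem_filter.mp hs).1
      have h2 : scenario_stem (pvCh (s', pvPairs ac_ids tc_ids s')) = s' :=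
        stem_pvCh (List.mem_filter.mp hs').1
      rw [← h1, ← h2]
      exact congrArg scenario_stem he
  · -- tc covered stems
    rw [List.foldl_map]
    have hfun : (fun (s : PySem.Set String) (k : String) =>
          if (pvPairs ac_ids tc_ids k).any (fun p => p.2 == "tc") then PySem.Set.add s k else s)
        = fun s k => if PySem.Set.contains
            (PySem.Set.ofList ((tc_ids.filter (fun c => !(c == ""))).map scenario_stem)) k
          then PySem.Set.add s k else s := by
      funext s k
      rw [pairs_any_tc]
    rw [hfun, foldl_add_if_of_nodup _ _ _ hkeysnd (by simp), ofList_filter, List.nil_append]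
    unfold pvAll
    rfl
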